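-- pv_equiv track=rewrite | github.com/debbiemarkslab/3D_from_DMS_Extended_Data | notebooks/DMS_to_3D6.py | minimum_ss_unit
-- ===== SOURCE A (Python) =====
-- def minimum_ss_unit(x, n=2):
--     '''from a given secondary structure,
--     drop ss elements less than a minimum length'''
--     x = x + ['']
--     ss = []
--     cur = []
--     for a in x:
--         if (len(cur) == 0) or (a == cur[-1]):
--             cur += [a]
--         elif len(cur) > n:
--             ss += cur
--             cur = [a]
--         else:
--             ss += ['C']*len(cur)
--             cur = [a]
--     return(ss)
-- ===== SOURCE B (Python) =====
-- def minimum_ss_unit(x, n=2):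
--     '''from a given secondary structure,
--     drop ss elements less than a minimum length'''
--     # run-length encode x + [''] in one pass, then emit runs (dropping the sentinel run)
--     runs = []
--     for a in x + ['']:
--         if runs and runs[-1][0] == a:
--             runs[-1][1] += 1
--         else:
--             runs.append([a, 1])
--     out = []
--     for k, L in runs[:-1]:
--         out.extend([k] * L if L > n else ['C'] * L)
--     return out
-- ===== Notes on version B (the rewrite author's own statement) =====
-- stated objective: alternative
-- what changed: B run-length-encodes x+[''] first, then emits each run (except the final sentinel run) as itself or as 'C's, replacing A's single-pass flush-on-change state machine.
import Mathlib
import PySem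

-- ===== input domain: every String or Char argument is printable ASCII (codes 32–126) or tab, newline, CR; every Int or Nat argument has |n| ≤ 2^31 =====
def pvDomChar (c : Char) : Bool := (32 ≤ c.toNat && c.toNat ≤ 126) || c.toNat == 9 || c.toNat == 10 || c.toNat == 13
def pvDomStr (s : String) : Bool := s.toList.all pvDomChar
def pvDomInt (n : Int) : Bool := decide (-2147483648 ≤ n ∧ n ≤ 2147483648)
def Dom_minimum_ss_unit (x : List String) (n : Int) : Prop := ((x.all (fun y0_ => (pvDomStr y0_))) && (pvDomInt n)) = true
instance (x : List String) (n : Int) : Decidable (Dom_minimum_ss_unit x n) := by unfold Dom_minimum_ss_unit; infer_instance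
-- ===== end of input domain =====

-- ===== PORT A =====
-- A: flush-on-change state machine over x ++ [""] with state (ss, cur)
def pvStepA (n : Int) (st : List String × List String) (a : String) : List String × List String :=
  if st.2 = [] ∨ PySem.List.pyGet? st.2 (-1) = some a then (st.1, st.2 ++ [a])
  else if (st.2.length : Int) > n then (st.1 ++ st.2, [a])
  else (st.1 ++ List.replicate st.2.length "C", [a])

def minimum_ss_unit (x : List String) (n : Int) : List String :=
  ((x ++ [""]).foldl (pvStepA n) ([], [])).1

-- ===== PORT B =====
-- B: run-length encoding of x ++ [""], then emit each run but the last
def pvRuns (k : String) (m : Nat) : List String → List (String × Nat)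
  | [] => [(k, m)]
  | a :: t => if a = k then pvRuns k (m + 1) t else (k, m) :: pvRuns a 1 t

def minimum_ss_unit_alt (x : List String) (n : Int) : List String :=
  (match x ++ [""] with
    | [] => []
    | a :: t => pvRuns a 1 t).dropLast.flatMap
    (fun (p : String × Nat) => if (p.2 : Int) > n then List.replicate p.2 p.1 else List.replicate p.2 "C")

-- ===== PRECONDITION & SPEC =====
def Spec_minimum_ss_unit (x : List String) (n : Int) (out : List String) : Prop := out = minimum_ss_unit_alt x n
instance (x : List String) (n : Int) (out : List String) : Decidable (Spec_minimum_ss_unit x n out) := by unfold Spec_minimum_ss_unit; infer_instance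

-- ===== CLAIM (what is proved, stated in full; the proofs are below) =====
def Claim_equal_minimum_ss_unit : Prop := ∀ (x : List String) (n : Int), Dom_minimum_ss_unit x n → Spec_minimum_ss_unit x n (minimum_ss_unit x n)

-- ===== LEMMAS AND PROOFS =====

lemma pvRuns_ne_nil (k : String) (m : Nat) (l : List String) : pvRuns k m l ≠ [] := by
  induction l generalizing k m with
  | nil => simp [pvRuns]
  | cons a t ih =>
    simp only [pvRuns]
    split
    · exact ih _ _
    · simp

lemma pyGet_neg1_replicate (k : String) (m : Nat) (hm : 0 < m) :
    PySem.List.pyGet? (List.replicate m k) (-1) = some k := by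
  obtain ⟨m', rfl⟩ : ∃ m', m = m' + 1 := ⟨m - 1, by omega⟩
  rw [List.replicate_succ', PySem.List.pyGet?_neg_one_append_singleton]

lemma pvFold_run (n : Int) (l : List String) (ss : List String) (k : String) (m : Nat)
    (hm : 0 < m) :
    (l.foldl (pvStepA n) (ss, List.replicate m k)).1 =
      ss ++ (pvRuns k m l).dropLast.flatMap
        (fun (p : String × Nat) => if (p.2 : Int) > n then List.replicate p.2 p.1 else List.replicate p.2 "C") := by
  induction l generalizing ss k m with
  | nil => simp [pvRuns]
  | cons a t ih =>
    by_cases hak : a = k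
    · subst hak
      have hstep : pvStepA n (ss, List.replicate m a) a = (ss, List.replicate (m + 1) a) := by
        simp [pvStepA, pyGet_neg1_replicate a m hm, List.replicate_succ' (n := m)]
      simp only [List.foldl_cons, hstep]
      rw [ih ss a (m + 1) (by omega)]
      simp [pvRuns]
    · have hget : ¬ (List.replicate m k = [] ∨
          PySem.List.pyGet? (List.replicate m k) (-1) = some a) := by
        rw [pyGet_neg1_replicate k m hm]
        rintro (h | h)
        · simp at h; omega
        · exact hak (Option.some_inj.mp h).symm
      have hdrop : ((k, m) :: pvRuns a 1 t).dropLast = (k, m) :: (pvRuns a 1 t).dropLast := by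
        rw [List.dropLast_cons_of_ne_nil (pvRuns_ne_nil a 1 t)]
      by_cases hmn : (m : Int) > n
      · have hstep : pvStepA n (ss, List.replicate m k) a =
            (ss ++ List.replicate m k, List.replicate 1 a) := by
          simp only [pvStepA, if_neg hget, List.length_replicate]
          rw [if_pos hmn]
          simp
        simp only [List.foldl_cons, hstep]
        rw [ih _ a 1 (by omega)]
        simp only [pvRuns, if_neg hak, hdrop]
        simp [hmn]
      · have hstep : pvStepA n (ss, List.replicate m k) a =
            (ss ++ List.replicate m "C", List.replicate 1 a) := by
          simp only [pvStepA, if_neg hget, List.length_replicate]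
          rw [if_neg hmn]
          simp
        simp only [List.foldl_cons, hstep]
        rw [ih _ a 1 (by omega)]
        simp only [pvRuns, if_neg hak, hdrop]
        simp [hmn]

-- ===== VERDICT (by name: the statement is the Claim_ definition above) =====
theorem minimum_ss_unit_spec : Claim_equal_minimum_ss_unit := by
  intro x n _
  unfold Spec_minimum_ss_unit minimum_ss_unit minimum_ss_unit_alt
  cases x with
  | nil =>
    simp [pvStepA, pvRuns]
  | cons h t =>
    have hstep : pvStepA n ([], []) h = ([], List.replicate 1 h) := by simp [pvStepA]
    simp only [List.cons_append, List.foldl_cons, hstep]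
    exact pvFold_run n (t ++ [""]) [] h 1 (by omega)
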